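-- pv_equiv track=rewrite | github.com/jelkotron/ragdoll_kitten | src/utils.py | axis_string_to_index_list
-- ===== SOURCE A (Python) =====
-- def axis_string_to_index_list(axis_string):
--     map = {
--         'X': 0,
--         'Y': 1,
--         'Z': 2,
--         }
--     indices = []
--
--     for key, value in map.items():
--         if key in axis_string.upper():
--             indices.append(value)
--
--     return indices
-- ===== SOURCE B (Python) =====
-- def axis_string_to_index_list(axis_string):
--     idx = {'X': 0, 'Y': 1, 'Z': 2}
--     found = {idx[c] for c in axis_string.upper() if c in idx}
--     return sorted(found)
-- ===== Notes on version B (the rewrite author's own statement) =====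
-- stated objective: idiomatic
-- what changed: B scans the input's characters once, mapping each axis letter to its index via a dict into a set comprehension and sorting the result, instead of A's loop over the fixed keys X/Y/Z each tested by substring search in the uppercased string.
import Mathlib
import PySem

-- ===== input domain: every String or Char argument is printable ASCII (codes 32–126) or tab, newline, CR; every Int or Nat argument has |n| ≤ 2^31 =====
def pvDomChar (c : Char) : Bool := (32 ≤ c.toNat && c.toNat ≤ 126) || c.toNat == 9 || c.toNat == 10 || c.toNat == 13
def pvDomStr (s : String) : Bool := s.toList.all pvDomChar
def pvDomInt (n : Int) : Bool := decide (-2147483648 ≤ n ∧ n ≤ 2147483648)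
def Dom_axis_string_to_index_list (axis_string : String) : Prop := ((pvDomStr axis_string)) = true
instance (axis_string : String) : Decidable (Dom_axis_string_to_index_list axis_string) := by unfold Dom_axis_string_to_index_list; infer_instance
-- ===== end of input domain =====

-- B scans the input's characters once into a set of indices and sorts, instead of A's
-- substring test of each fixed key in the uppercased string (objective: idiomatic).

-- ===== PORT A =====
def axis_string_to_index_list (axis_string : String) : List Int :=
  let map : PySem.Dict String Int :=
    ((PySem.Dict.empty.insert "X" 0).insert "Y" 1).insert "Z" 2
  let indices : List Int := []
  (PySem.Dict.items map).foldl
    (fun indices kv =>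
      if PySem.Str.isIn kv.1 (PySem.Str.upper axis_string) then indices ++ [kv.2] else indices)
    indices

-- ===== PORT B =====
def axis_string_to_index_list_alt (axis_string : String) : List Int :=
  let idx : PySem.Dict Char Int :=
    ((PySem.Dict.empty.insert 'X' 0).insert 'Y' 1).insert 'Z' 2
  let found : PySem.Set Int :=
    PySem.Set.ofList
      (((PySem.Str.upper axis_string).toList.filter
          (fun c => PySem.Dict.contains idx c)).map
        (fun c => PySem.Dict.getD idx c 0))
  PySem.List.sorted found (fun x => x) false

-- ===== PRECONDITION & SPEC =====
def Spec_axis_string_to_index_list (axis_string : String) (out : List Int) : Prop := out = axis_string_to_index_list_alt axis_string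
instance (axis_string : String) (out : List Int) : Decidable (Spec_axis_string_to_index_list axis_string out) := by unfold Spec_axis_string_to_index_list; infer_instance

-- ===== CLAIM (what is proved, stated in full; the proofs are below) =====
def Claim_equal_axis_string_to_index_list : Prop := ∀ (axis_string : String), Dom_axis_string_to_index_list axis_string → Spec_axis_string_to_index_list axis_string (axis_string_to_index_list axis_string)

-- ===== LEMMAS AND PROOFS =====

-- sorted(S) for a dup-free S whose elements are characterised by three flags is the ascending literal list
lemma sorted_flags_eq (S : List Int) (hn : S.Nodup) (b0 b1 b2 : Bool)
    (hm : ∀ v : Int, v ∈ S ↔ ((v = 0 ∧ b0 = true) ∨ (v = 1 ∧ b1 = true) ∨ (v = 2 ∧ b2 = true))) :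
    PySem.List.sorted S (fun x => x) false =
      ((if b0 then [(0 : Int)] else []) ++ ((if b1 then [1] else []) ++ (if b2 then [2] else []))) := by
  apply PySem.List.sorted_id_eq_of_perm_of_pairwise
  · have hLn : ((if b0 then [(0 : Int)] else []) ++ ((if b1 then [1] else []) ++ (if b2 then [2] else []))).Nodup := by
      cases b0 <;> cases b1 <;> cases b2 <;> decide
    rw [List.perm_ext_iff_of_nodup hLn hn]
    intro a
    rw [hm a]
    cases b0 <;> cases b1 <;> cases b2 <;> simp
  · cases b0 <;> cases b1 <;> cases b2 <;> decide

-- membership in B's set of indices, in terms of which axis letters occur in u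
lemma mem_found_iff (u : List Char) (v : Int) :
    v ∈ PySem.Set.ofList
        ((u.filter (fun c => PySem.Dict.contains (((PySem.Dict.empty.insert 'X' 0).insert 'Y' 1).insert 'Z' 2) c)).map
          (fun c => PySem.Dict.getD (((PySem.Dict.empty.insert 'X' 0).insert 'Y' 1).insert 'Z' 2) c 0)) ↔
      ((v = 0 ∧ decide ('X' ∈ u) = true) ∨ (v = 1 ∧ decide ('Y' ∈ u) = true) ∨ (v = 2 ∧ decide ('Z' ∈ u) = true)) := by
  rw [PySem.Set.mem_ofList]
  simp only [List.mem_map, List.mem_filter, decide_eq_true_eq]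
  constructor
  · rintro ⟨c, ⟨hcu, hq⟩, hv⟩
    by_cases h0 : c = 'X'
    · subst h0; exact Or.inl ⟨hv.symm, hcu⟩
    by_cases h1 : c = 'Y'
    · subst h1; exact Or.inr (Or.inl ⟨hv.symm, hcu⟩)
    by_cases h2 : c = 'Z'
    · subst h2; exact Or.inr (Or.inr ⟨hv.symm, hcu⟩)
    · exfalso
      rw [PySem.Dict.contains_eq_isSome_get?] at hq
      rw [show (PySem.Dict.get? (((PySem.Dict.empty.insert 'X' 0).insert 'Y' 1).insert 'Z' 2) c) = none by
            simp [PySem.Dict.get?_insert, h0, h1, h2]] at hq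
      simp at hq
  · rintro (⟨hv, hc⟩ | ⟨hv, hc⟩ | ⟨hv, hc⟩) <;> subst hv
    · exact ⟨'X', ⟨hc, by decide⟩, by decide⟩
    · exact ⟨'Y', ⟨hc, by decide⟩, by decide⟩
    · exact ⟨'Z', ⟨hc, by decide⟩, by decide⟩

-- a single-character substring test is character membership
lemma isIn_single (c : Char) (l : List Char) :
    PySem.Chars.isIn [c] l = decide (c ∈ l) := by
  rcases h : decide (c ∈ l) with _ | _
  · simp at h
    rw [Bool.eq_false_iff]
    intro hIn
    rw [PySem.Chars.isIn_iff_infix, List.singleton_infix_iff] at hIn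
    exact h hIn
  · simp at h
    rw [PySem.Chars.isIn_iff_infix, List.singleton_infix_iff]
    exact h

-- ===== VERDICT (by name: the statement is the Claim_ definition above) =====
theorem axis_string_to_index_list_spec : Claim_equal_axis_string_to_index_list := by
  intro s _
  unfold Spec_axis_string_to_index_list axis_string_to_index_list axis_string_to_index_list_alt
  simp only []
  rw [PySem.List.foldl_append_if]
  refine Eq.trans ?_
    (sorted_flags_eq _ (PySem.Set.nodup_ofList _) _ _ _ (mem_found_iff ((PySem.Str.upper s).toList))).symm
  rw [show (PySem.Dict.items (((PySem.Dict.empty.insert "X" (0 : Int)).insert "Y" 1).insert "Z" 2)) =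
        [("X", 0), ("Y", 1), ("Z", 2)] by decide]
  by_cases hX : 'X' ∈ PySem.Chars.upper s.toList <;>
    by_cases hY : 'Y' ∈ PySem.Chars.upper s.toList <;>
      by_cases hZ : 'Z' ∈ PySem.Chars.upper s.toList <;>
        simp [isIn_single, hX, hY, hZ,
          show ("X".toList) = ['X'] from rfl, show ("Y".toList) = ['Y'] from rfl,
          show ("Z".toList) = ['Z'] from rfl]
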